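-- pv_equiv track=rewrite | github.com/PNeekeetah/AdventOfCode2024 | day19.py | solve_day_19_part_2
-- ===== SOURCE A (Python) =====
-- def solve_day_19_part_2(towels, patterns):
--
--     def backtrack(pattern, index):
--         possible = False
--
--         if index == len(pattern):
--             return True
--
--         for towel in towels:
--             possible_matches = len(towel)
--             if pattern[index:index+possible_matches] == towel:
--                 possible = possible or backtrack(pattern, index + possible_matches)
--             if possible:
--                 return True
--
--     def count_posibilities(pattern, index, state = None):
--         if state is None:
--             state = {}
--
--         number = 0
--
--         if index == len(pattern):
--             return 1
--
--         for towel in towels: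
--             possible_matches = len(towel)
--             if pattern[index:index+possible_matches] == towel:
--                 if index + possible_matches in state:
--                     number += state[index + possible_matches]
--                 else:
--                     added = count_posibilities(pattern, index + possible_matches, state)
--                     state[index + possible_matches] = added
--                     number += added
--
--
--         return number
--
--
--     total_possibilities = 0
--     for pattern in patterns:
--         if backtrack(pattern, 0):
--             total_possibilities += count_posibilities(pattern, 0)
--
--
--     return total_possibilities
-- ===== SOURCE B (Python) =====
-- def solve_day_19_part_2(towels, patterns):
--     total = 0
--     for pattern in patterns:
--         # ways[j] = number of ways to tile pattern[i+j:], built back-to-front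
--         ways = [1]
--         for i in range(len(pattern) - 1, -1, -1):
--             ways = [sum(ways[len(t) - 1] for t in towels
--                         if pattern[i:i + len(t)] == t)] + ways
--         total += ways[0]
--     return total
-- ===== Notes on version B (the rewrite author's own statement) =====
-- stated objective: alternative
-- what changed: Replaces A's recursive backtracking feasibility check plus memoized recursive count (a threaded memo dict) by a single bottom-up suffix DP per pattern, built back-to-front, whose entry 0 is the count (0 exactly when the pattern is infeasible).
import Mathlib
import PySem

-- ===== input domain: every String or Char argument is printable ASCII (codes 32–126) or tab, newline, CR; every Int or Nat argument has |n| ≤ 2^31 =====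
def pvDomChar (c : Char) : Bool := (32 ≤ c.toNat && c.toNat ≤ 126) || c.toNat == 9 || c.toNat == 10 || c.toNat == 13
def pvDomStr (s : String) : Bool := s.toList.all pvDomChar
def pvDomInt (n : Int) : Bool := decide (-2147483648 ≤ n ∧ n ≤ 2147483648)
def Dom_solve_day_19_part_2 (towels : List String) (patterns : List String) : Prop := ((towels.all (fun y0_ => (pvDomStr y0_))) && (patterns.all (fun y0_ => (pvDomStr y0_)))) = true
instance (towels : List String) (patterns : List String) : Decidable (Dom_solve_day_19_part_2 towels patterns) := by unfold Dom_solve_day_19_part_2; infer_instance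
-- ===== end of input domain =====

-- B replaces A's recursive backtracking feasibility check + memoized recursive count (threaded memo
-- dict) by a single bottom-up suffix DP built back-to-front (ways[0] is 0 exactly when the pattern
-- is infeasible); objective: an alternative, non-recursive algorithm of similar measured cost.

-- ===== PORT A =====
-- inner 'backtrack' (fuel makes the recursion total; pattern.length + 1 fuel is enough whenever
-- every towel is nonempty, which Pre_ guarantees for every pattern that is not "")
mutual
def pvA_bt (ts : List (List Char)) (p : List Char) : Nat → Nat → Bool
  | 0, _ => false
  | f + 1, i =>
    if i = p.length then true
    else pvA_btLoop ts p ts f i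
  termination_by f _ => (f, 0)
def pvA_btLoop (ts : List (List Char)) (p : List Char) : List (List Char) → Nat → Nat → Bool
  | [], _, _ => false
  | t :: rest, f, i =>
    if PySem.List.slice p (some (i : Int)) (some ((i : Int) + (t.length : Int))) = t then
      if pvA_bt ts p f (i + t.length) then true else pvA_btLoop ts p rest f i
    else pvA_btLoop ts p rest f i
  termination_by rem f _ => (f, rem.length + 1)
end

-- inner 'count_posibilities' with its threaded memo dict 'state'
mutual
def pvA_count (ts : List (List Char)) (p : List Char) : Nat → Nat → PySem.Dict Nat Int → Int × PySem.Dict Nat Int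
  | 0, _, st => (0, st)
  | f + 1, i, st =>
    if i = p.length then (1, st)
    else pvA_countLoop ts p ts f i 0 st
  termination_by f _ _ => (f, 0)
def pvA_countLoop (ts : List (List Char)) (p : List Char) : List (List Char) → Nat → Nat → Int → PySem.Dict Nat Int → Int × PySem.Dict Nat Int
  | [], _, _, num, st => (num, st)
  | t :: rest, f, i, num, st =>
    if PySem.List.slice p (some (i : Int)) (some ((i : Int) + (t.length : Int))) = t then
      match st.get? (i + t.length) with
      | some v => pvA_countLoop ts p rest f i (num + v) st
      | none =>
        let r := pvA_count ts p f (i + t.length) st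
        pvA_countLoop ts p rest f i (num + r.1) (r.2.insert (i + t.length) r.1)
    else pvA_countLoop ts p rest f i num st
  termination_by rem f _ _ _ => (f, rem.length + 1)
end

def solve_day_19_part_2 (towels : List String) (patterns : List String) : Int :=
  patterns.foldl (fun total pat =>
    let ts := towels.map String.toList
    let p := pat.toList
    if pvA_bt ts p (p.length + 1) 0 then
      total + (pvA_count ts p (p.length + 1) 0 PySem.Dict.empty).1
    else total) 0

-- ===== PORT B =====
-- one row of the suffix DP: sum(ways[len(t) - 1] for t in towels if pattern[i:i+len(t)] == t)
def pvB_row (ts : List (List Char)) (p : List Char) (i : Nat) (ways : List Int) : Int :=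
  ((ts.filter (fun t => PySem.List.slice p (some (i : Int)) (some ((i : Int) + (t.length : Int))) == t)).map
    (fun t => (PySem.List.pyGet? ways ((t.length : Int) - 1)).getD 0)).sum

-- the DP list after k iterations of the downward loop (built back-to-front by prepending)
def pvB_ways (ts : List (List Char)) (p : List Char) : Nat → List Int
  | 0 => [1]
  | k + 1 => pvB_row ts p (p.length - (k + 1)) (pvB_ways ts p k) :: pvB_ways ts p k

def solve_day_19_part_2_alt (towels : List String) (patterns : List String) : Int :=
  patterns.foldl (fun total pat =>
    total + (PySem.List.pyGet? (pvB_ways (towels.map String.toList) pat.toList pat.toList.length) 0).getD 0) 0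

-- ===== PRECONDITION & SPEC =====
-- Pre_ excludes exactly the inputs where A's recursion never terminates (Python RecursionError):
-- an empty towel string together with at least one nonempty pattern.
def Pre_solve_day_19_part_2 (towels : List String) (patterns : List String) : Prop :=
  "" ∈ towels → ∀ pat ∈ patterns, pat = ""
instance (towels : List String) (patterns : List String) : Decidable (Pre_solve_day_19_part_2 towels patterns) := by unfold Pre_solve_day_19_part_2; infer_instance
def pvWitness_solve_day_19_part_2 : List String × List String := (["a", "ab", "b"], ["aab", "", "ba"])

def Spec_solve_day_19_part_2 (towels : List String) (patterns : List String) (out : Int) : Prop := out = solve_day_19_part_2_alt towels patterns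
instance (towels : List String) (patterns : List String) (out : Int) : Decidable (Spec_solve_day_19_part_2 towels patterns out) := by unfold Spec_solve_day_19_part_2; infer_instance

-- ===== CLAIM (what is proved, stated in full; the proofs are below) =====
def Claim_equal_solve_day_19_part_2 : Prop := ∀ (towels : List String) (patterns : List String), Dom_solve_day_19_part_2 towels patterns → Pre_solve_day_19_part_2 towels patterns → Spec_solve_day_19_part_2 towels patterns (solve_day_19_part_2 towels patterns)

-- ===== LEMMAS AND PROOFS =====

-- pure reference count: pvCf ts p f i = number of towel tilings of p[i:], with fuel f
def pvCf (ts : List (List Char)) (p : List Char) : Nat → Nat → Int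
  | f, i =>
    if i = p.length then 1
    else
      match f with
      | 0 => 0
      | f + 1 =>
        (ts.map (fun t =>
          if PySem.List.slice p (some (i : Int)) (some ((i : Int) + (t.length : Int))) = t then
            pvCf ts p f (i + t.length)
          else 0)).sum
termination_by f _ => f

def pvC (ts : List (List Char)) (p : List Char) (i : Nat) : Int := pvCf ts p (p.length - i) i

theorem pv_match_len (p : List Char) (i : Nat) (t : List Char)
    (h : PySem.List.slice p (some (i : Int)) (some ((i : Int) + (t.length : Int))) = t) :
    t.length ≤ p.length - i := by
  rw [PySem.List.slice_natCast_add] at h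
  have := congrArg List.length h
  simp at this
  omega

theorem pvCf_nonneg (ts : List (List Char)) (p : List Char) : ∀ f i, 0 ≤ pvCf ts p f i := by
  intro f
  induction f with
  | zero =>
    intro i; unfold pvCf; split
    · exact zero_le_one
    · exact le_refl 0
  | succ f ih =>
    intro i; unfold pvCf; split
    · exact zero_le_one
    · apply List.sum_nonneg
      intro x hx
      simp only [List.mem_map] at hx
      obtain ⟨t, _, rfl⟩ := hx
      split
      · exact ih _
      · exact le_refl 0

theorem pvCf_eq_one (ts : List (List Char)) (p : List Char) (f i : Nat) (hi : i = p.length) :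
    pvCf ts p f i = 1 := by
  unfold pvCf; rw [if_pos hi]

theorem pvCf_eq_sum (ts : List (List Char)) (p : List Char) (f i : Nat) (hi : i ≠ p.length) :
    pvCf ts p (f + 1) i = (ts.map (fun t =>
      if PySem.List.slice p (some (i : Int)) (some ((i : Int) + (t.length : Int))) = t
      then pvCf ts p f (i + t.length) else 0)).sum := by
  conv_lhs => unfold pvCf
  rw [if_neg hi]

theorem pvCf_zero_eq (ts : List (List Char)) (p : List Char) (i : Nat) (hi : i ≠ p.length) :
    pvCf ts p 0 i = 0 := by
  unfold pvCf; rw [if_neg hi]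

theorem pvCf_zero_of_gt (ts : List (List Char)) (p : List Char)
    (hne : ∀ t ∈ ts, t ≠ []) (f : Nat) (i : Nat) (hi : i ≠ p.length) (hgt : p.length ≤ i) :
    pvCf ts p f i = 0 := by
  cases f with
  | zero => exact pvCf_zero_eq ts p i hi
  | succ f =>
    rw [pvCf_eq_sum ts p f i hi]
    have : ∀ t ∈ ts, (if PySem.List.slice p (some (i : Int)) (some ((i : Int) + (t.length : Int))) = t
        then pvCf ts p f (i + t.length) else 0) = 0 := by
      intro t ht
      rw [if_neg]
      intro h
      have hlen := pv_match_len p i t h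
      have : t = [] := List.length_eq_zero_iff.mp (by omega)
      exact hne t ht this
    rw [List.map_congr_left this]
    simp

theorem pvCf_fuel (ts : List (List Char)) (p : List Char) (hne : ∀ t ∈ ts, t ≠ []) :
    ∀ d i f g, p.length - i = d → p.length - i ≤ f → p.length - i ≤ g →
      pvCf ts p f i = pvCf ts p g i := by
  intro d
  induction d using Nat.strong_induction_on with
  | _ d ih =>
    intro i f g hd hf hg
    by_cases hi : i = p.length
    · rw [pvCf_eq_one ts p f i hi, pvCf_eq_one ts p g i hi]
    · by_cases hgt : p.length ≤ i
      · rw [pvCf_zero_of_gt ts p hne f i hi hgt, pvCf_zero_of_gt ts p hne g i hi hgt]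
      · have hlt : i < p.length := by omega
        have hd1 : 1 ≤ d := by omega
        obtain ⟨f', rfl⟩ : ∃ f', f = f' + 1 := ⟨f - 1, by omega⟩
        obtain ⟨g', rfl⟩ : ∃ g', g = g' + 1 := ⟨g - 1, by omega⟩
        rw [pvCf_eq_sum ts p f' i hi, pvCf_eq_sum ts p g' i hi]
        apply congrArg List.sum
        apply List.map_congr_left
        intro t ht
        split
        · next hm =>
          have h1 : 1 ≤ t.length := List.length_pos_iff.mpr (hne t ht)
          have h2 : t.length ≤ p.length - i := pv_match_len p i t hm
          exact ih (p.length - (i + t.length)) (by omega) (i + t.length) f' g' rfl (by omega) (by omega)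
        · rfl

theorem pvC_nonneg (ts : List (List Char)) (p : List Char) (i : Nat) : 0 ≤ pvC ts p i :=
  pvCf_nonneg ts p _ i

theorem pvC_len (ts : List (List Char)) (p : List Char) : pvC ts p p.length = 1 := by
  unfold pvC
  exact pvCf_eq_one ts p _ _ rfl

theorem pvC_succ (ts : List (List Char)) (p : List Char) (hne : ∀ t ∈ ts, t ≠ [])
    (i : Nat) (hi : i < p.length) :
    pvC ts p i = (ts.map (fun t =>
      if PySem.List.slice p (some (i : Int)) (some ((i : Int) + (t.length : Int))) = t
      then pvC ts p (i + t.length) else 0)).sum := by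
  unfold pvC
  obtain ⟨d', hd'⟩ : ∃ d', p.length - i = d' + 1 := ⟨p.length - i - 1, by omega⟩
  rw [hd', pvCf_eq_sum ts p d' i (by omega)]
  apply congrArg List.sum
  apply List.map_congr_left
  intro t ht
  split
  · next hm =>
    have h1 : 1 ≤ t.length := List.length_pos_iff.mpr (hne t ht)
    have h2 : t.length ≤ p.length - i := pv_match_len p i t hm
    exact pvCf_fuel ts p hne (p.length - (i + t.length)) (i + t.length) d' (p.length - (i + t.length))
      rfl (by omega) (by omega)
  · rfl

theorem pv_sum_filter_map {α : Type} (l : List α) (q : α → Bool) (f : α → Int) :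
    ((l.filter q).map f).sum = (l.map fun x => if q x then f x else 0).sum := by
  induction l with
  | nil => rfl
  | cons x xs ih =>
    by_cases hq : q x
    · simp [hq, ih]
    · simp [hq, ih]

theorem pv_sum_pos_iff (l : List Int) (h : ∀ x ∈ l, 0 ≤ x) :
    0 < l.sum ↔ ∃ x ∈ l, 0 < x := by
  induction l with
  | nil => simp
  | cons x xs ih =>
    have hx := h x (by simp)
    have hxs : 0 ≤ xs.sum := List.sum_nonneg (fun y hy => h y (by simp [hy]))
    have ih' := ih (fun y hy => h y (by simp [hy]))
    simp only [List.sum_cons, List.mem_cons]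
    constructor
    · intro hpos
      by_cases h0 : 0 < x
      · exact ⟨x, Or.inl rfl, h0⟩
      · obtain ⟨y, hy, hy0⟩ := ih'.mp (by omega)
        exact ⟨y, Or.inr hy, hy0⟩
    · rintro ⟨y, rfl | hy, hy0⟩
      · omega
      · have := ih'.mpr ⟨y, hy, hy0⟩
        omega

theorem pv_pos_ite (c : Prop) [Decidable c] (x : Int) :
    (0 < if c then x else 0) ↔ c ∧ 0 < x := by
  split
  · next h => simp [h]
  · next h => simp [h]

theorem pv_bt_eq (ts : List (List Char)) (p : List Char) (hne : ∀ t ∈ ts, t ≠ []) :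
    ∀ d i f, p.length - i = d → p.length - i < f →
      (pvA_bt ts p f i = true ↔ 0 < pvC ts p i) := by
  intro d
  induction d using Nat.strong_induction_on with
  | _ d ih =>
    intro i f hd hf
    obtain ⟨f', rfl⟩ : ∃ f', f = f' + 1 := ⟨f - 1, by omega⟩
    rw [pvA_bt]
    by_cases hi : i = p.length
    · rw [if_pos hi, hi, pvC_len]
      norm_num
    · rw [if_neg hi]
      by_cases hgt : p.length ≤ i
      · have hloop : ∀ rem, (∀ t ∈ rem, t ∈ ts) → pvA_btLoop ts p rem f' i = false := by
          intro rem
          induction rem with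
          | nil => intro _; rw [pvA_btLoop]
          | cons t rest ihr =>
            intro hsub
            rw [pvA_btLoop, if_neg, ihr (fun x hx => hsub x (by simp [hx]))]
            intro hm
            have hlen := pv_match_len p i t hm
            exact hne t (hsub t (by simp)) (List.length_eq_zero_iff.mp (by omega))
        rw [hloop ts (fun _ h => h)]
        unfold pvC
        rw [show p.length - i = 0 from by omega, pvCf_zero_eq ts p i hi]
        simp
      · have hlt : i < p.length := by omega
        have hf' : p.length - i ≤ f' := by omega
        have hloop : ∀ rem, (∀ t ∈ rem, t ∈ ts) →
            (pvA_btLoop ts p rem f' i = true ↔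
              ∃ t ∈ rem, PySem.List.slice p (some (i : Int)) (some ((i : Int) + (t.length : Int))) = t
                ∧ 0 < pvC ts p (i + t.length)) := by
          intro rem
          induction rem with
          | nil => intro _; rw [pvA_btLoop]; simp
          | cons t rest ihr =>
            intro hsub
            have hrest := ihr (fun x hx => hsub x (by simp [hx]))
            rw [pvA_btLoop]
            by_cases hm : PySem.List.slice p (some (i : Int)) (some ((i : Int) + (t.length : Int))) = t
            · rw [if_pos hm]
              have h1 : 1 ≤ t.length := List.length_pos_iff.mpr (hne t (hsub t (by simp)))
              have h2 : t.length ≤ p.length - i := pv_match_len p i t hm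
              have hbt := ih (p.length - (i + t.length)) (by omega) (i + t.length) f' rfl (by omega)
              cases hb : pvA_bt ts p f' (i + t.length) with
              | true =>
                rw [if_pos rfl]
                exact iff_of_true rfl ⟨t, by simp, hm, hbt.mp hb⟩
              | false =>
                rw [if_neg (by simp), hrest]
                constructor
                · rintro ⟨x, hx, hmx, hpx⟩
                  exact ⟨x, by simp [hx], hmx, hpx⟩
                · rintro ⟨x, hx, hmx, hpx⟩
                  rcases List.mem_cons.mp hx with rfl | hx'
                  · exact absurd (hbt.mpr hpx) (by simp [hb])
                  · exact ⟨x, hx', hmx, hpx⟩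
            · rw [if_neg hm, hrest]
              constructor
              · rintro ⟨x, hx, hmx, hpx⟩
                exact ⟨x, by simp [hx], hmx, hpx⟩
              · rintro ⟨x, hx, hmx, hpx⟩
                rcases List.mem_cons.mp hx with rfl | hx'
                · exact absurd hmx hm
                · exact ⟨x, hx', hmx, hpx⟩
        rw [hloop ts (fun _ h => h), pvC_succ ts p hne i hlt, pv_sum_pos_iff]
        · constructor
          · rintro ⟨t, ht, hmt, hpt⟩
            exact ⟨_, List.mem_map_of_mem ht, by rw [if_pos hmt]; exact hpt⟩
          · rintro ⟨y, hy, hpy⟩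
            obtain ⟨t, ht, rfl⟩ := List.mem_map.mp hy
            obtain ⟨hmt, hpt⟩ := (pv_pos_ite _ _).mp hpy
            exact ⟨t, ht, hmt, hpt⟩
        · intro x hx
          obtain ⟨t, ht, rfl⟩ := List.mem_map.mp hx
          split
          · exact pvC_nonneg ts p _
          · exact le_refl 0

def pvValid (ts : List (List Char)) (p : List Char) (st : PySem.Dict Nat Int) : Prop :=
  ∀ k v, st.get? k = some v → v = pvC ts p k

theorem pv_count_eq (ts : List (List Char)) (p : List Char) (hne : ∀ t ∈ ts, t ≠ []) :
    ∀ d i f st, p.length - i = d → p.length - i < f → pvValid ts p st →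
      (pvA_count ts p f i st).1 = pvC ts p i ∧ pvValid ts p (pvA_count ts p f i st).2 := by
  intro d
  induction d using Nat.strong_induction_on with
  | _ d ih =>
    intro i f st hd hf hv
    obtain ⟨f', rfl⟩ : ∃ f', f = f' + 1 := ⟨f - 1, by omega⟩
    rw [pvA_count]
    by_cases hi : i = p.length
    · rw [if_pos hi]
      exact ⟨by rw [hi, pvC_len], hv⟩
    · rw [if_neg hi]
      have hloop : ∀ rem, (∀ t ∈ rem, t ∈ ts) → ∀ num st', pvValid ts p st' →
          (pvA_countLoop ts p rem f' i num st').1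
            = num + (rem.map (fun t =>
                if PySem.List.slice p (some (i : Int)) (some ((i : Int) + (t.length : Int))) = t
                then pvC ts p (i + t.length) else 0)).sum
            ∧ pvValid ts p (pvA_countLoop ts p rem f' i num st').2 := by
        intro rem
        induction rem with
        | nil =>
          intro _ num st' hv'
          rw [pvA_countLoop]
          exact ⟨by simp, hv'⟩
        | cons t rest ihr =>
          intro hsub num st' hv'
          have hsub' : ∀ x ∈ rest, x ∈ ts := fun x hx => hsub x (by simp [hx])
          rw [pvA_countLoop]
          by_cases hm : PySem.List.slice p (some (i : Int)) (some ((i : Int) + (t.length : Int))) = t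
          · rw [if_pos hm]
            have h1 : 1 ≤ t.length := List.length_pos_iff.mpr (hne t (hsub t (by simp)))
            have h2 : t.length ≤ p.length - i := pv_match_len p i t hm
            cases hg : st'.get? (i + t.length) with
            | some v =>
              have hvv := hv' _ _ hg
              obtain ⟨e1, e2⟩ := ihr hsub' (num + v) st' hv'
              refine ⟨?_, e2⟩
              rw [e1, List.map_cons, List.sum_cons, if_pos hm, hvv]
              ring
            | none =>
              have hrec := ih (p.length - (i + t.length)) (by omega) (i + t.length) f' st' rfl
                (by omega) hv'
              have hvins : pvValid ts p
                  ((pvA_count ts p f' (i + t.length) st').2.insert (i + t.length)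
                    (pvA_count ts p f' (i + t.length) st').1) := by
                intro k v hk
                rw [PySem.Dict.get?_insert] at hk
                split at hk
                · next hkk =>
                  cases hk
                  rw [hkk]
                  exact hrec.1
                · exact hrec.2 k v hk
              obtain ⟨e1, e2⟩ := ihr hsub'
                (num + (pvA_count ts p f' (i + t.length) st').1)
                ((pvA_count ts p f' (i + t.length) st').2.insert (i + t.length)
                  (pvA_count ts p f' (i + t.length) st').1) hvins
              refine ⟨?_, e2⟩
              rw [e1, hrec.1, List.map_cons, List.sum_cons, if_pos hm]
              ring
          · rw [if_neg hm]
            obtain ⟨e1, e2⟩ := ihr hsub' num st' hv'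
            refine ⟨?_, e2⟩
            rw [e1, List.map_cons, List.sum_cons, if_neg hm]
            ring
      obtain ⟨e1, e2⟩ := hloop ts (fun _ h => h) 0 st hv
      refine ⟨?_, e2⟩
      rw [e1, zero_add]
      by_cases hgt : p.length ≤ i
      · have hz : ∀ t ∈ ts, (if PySem.List.slice p (some (i : Int)) (some ((i : Int) + (t.length : Int))) = t
            then pvC ts p (i + t.length) else 0) = 0 := by
          intro t ht
          rw [if_neg]
          intro h
          have hlen := pv_match_len p i t h
          exact hne t ht (List.length_eq_zero_iff.mp (by omega))
        rw [List.map_congr_left hz]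
        unfold pvC
        rw [show p.length - i = 0 from by omega, pvCf_zero_eq ts p i hi]
        simp
      · exact (pvC_succ ts p hne i (by omega)).symm

theorem pv_ways_eq (ts : List (List Char)) (p : List Char) (hne : ∀ t ∈ ts, t ≠ []) :
    ∀ k, k ≤ p.length →
      pvB_ways ts p k = (List.range (k + 1)).map (fun j => pvC ts p (p.length - k + j)) := by
  intro k
  induction k with
  | zero =>
    intro _
    show [1] = [pvC ts p (p.length - 0 + 0)]
    rw [show p.length - 0 + 0 = p.length from by omega, pvC_len]
  | succ k ihk =>
    intro hk
    have ihk' := ihk (by omega)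
    show pvB_row ts p (p.length - (k + 1)) (pvB_ways ts p k) :: pvB_ways ts p k = _
    rw [List.range_succ_eq_map, List.map_cons, List.map_map]
    have htail : (List.range (k + 1)).map ((fun j => pvC ts p (p.length - (k + 1) + j)) ∘ Nat.succ)
        = pvB_ways ts p k := by
      rw [ihk']
      apply List.map_congr_left
      intro j hj
      show pvC ts p (p.length - (k + 1) + (j + 1)) = pvC ts p (p.length - k + j)
      congr 1
      omega
    rw [htail]
    congr 1
    -- head: the DP row equals pvC at index i = p.length - (k+1)
    set i := p.length - (k + 1) with hi
    have hilt : i < p.length := by omega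
    unfold pvB_row
    simp only [Nat.add_zero]
    rw [pv_sum_filter_map, pvC_succ ts p hne i hilt]
    apply congrArg List.sum
    apply List.map_congr_left
    intro t ht
    by_cases hm : PySem.List.slice p (some (i : Int)) (some ((i : Int) + (t.length : Int))) = t
    · rw [if_pos (by simpa using hm), if_pos hm]
      have h1 : 1 ≤ t.length := List.length_pos_iff.mpr (hne t ht)
      have h2 : t.length ≤ p.length - i := pv_match_len p i t hm
      have hcast : (t.length : Int) - 1 = ((t.length - 1 : Nat) : Int) := by omega
      rw [hcast, PySem.List.pyGet?_natCast, ihk', List.getElem?_map, List.getElem?_range (by omega)]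
      show pvC ts p (p.length - k + (t.length - 1)) = pvC ts p (i + t.length)
      congr 1
      omega
    · rw [if_neg (by simpa using hm), if_neg hm]

theorem pv_body_eq (towels : List String) (pat : String)
    (h : (∀ t ∈ towels.map String.toList, t ≠ []) ∨ pat = "") (total : Int) :
    (if pvA_bt (towels.map String.toList) pat.toList (pat.toList.length + 1) 0 then
      total + (pvA_count (towels.map String.toList) pat.toList (pat.toList.length + 1) 0 PySem.Dict.empty).1
    else total)
    = total + (PySem.List.pyGet? (pvB_ways (towels.map String.toList) pat.toList pat.toList.length) 0).getD 0 := by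
  rcases h with hne | rfl
  · set ts := towels.map String.toList
    set p := pat.toList with hp
    set n := p.length with hn
    have hvempty : pvValid ts p PySem.Dict.empty := by
      intro k v hk
      rw [PySem.Dict.get?_empty] at hk
      cases hk
    have hbt := pv_bt_eq ts p hne n 0 (n + 1) (by omega) (by omega)
    have hways := pv_ways_eq ts p hne n (le_refl n)
    have hrhs : (PySem.List.pyGet? (pvB_ways ts p n) 0).getD 0 = pvC ts p 0 := by
      rw [hways, List.range_succ_eq_map, List.map_cons,
        show p.length - n + 0 = 0 from by omega]
      simp
    rw [hrhs]
    by_cases hb : pvA_bt ts p (n + 1) 0 = true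
    · rw [if_pos hb, (pv_count_eq ts p hne n 0 (n + 1) PySem.Dict.empty (by omega) (by omega) hvempty).1]
    · rw [if_neg hb]
      have h0 : ¬ 0 < pvC ts p 0 := fun hpos => hb (hbt.mpr hpos)
      have := pvC_nonneg ts p 0
      omega
  · have hp : ("" : String).toList = [] := rfl
    simp only [hp, List.length_nil]
    have hb : pvA_bt (towels.map String.toList) [] (0 + 1) 0 = true := by
      rw [pvA_bt]
      simp
    have hc : pvA_count (towels.map String.toList) [] (0 + 1) 0 PySem.Dict.empty
        = (1, PySem.Dict.empty) := by
      rw [pvA_count]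
      simp
    rw [show (1 : Nat) = 0 + 1 from rfl, if_pos hb, hc]
    show total + 1 = total + (PySem.List.pyGet? (pvB_ways (towels.map String.toList) [] 0) 0).getD 0
    simp [pvB_ways]

theorem pv_foldl_congr {α β : Type} (f g : β → α → β) (l : List α)
    (h : ∀ x ∈ l, ∀ acc, f acc x = g acc x) : ∀ acc, l.foldl f acc = l.foldl g acc := by
  induction l with
  | nil => intro acc; rfl
  | cons x xs ih =>
    intro acc
    rw [List.foldl_cons, List.foldl_cons, h x (by simp), ih (fun y hy acc => h y (by simp [hy]) acc)]

-- ===== VERDICT (by name: the statement is the Claim_ definition above) =====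
theorem solve_day_19_part_2_spec : Claim_equal_solve_day_19_part_2 := by
  intro towels patterns _ hpre
  unfold Spec_solve_day_19_part_2 solve_day_19_part_2 solve_day_19_part_2_alt
  apply pv_foldl_congr
  intro pat hpat total
  simp only []
  apply pv_body_eq
  by_cases hmem : "" ∈ towels
  · exact Or.inr (hpre hmem pat hpat)
  · left
    intro t ht
    simp only [List.mem_map] at ht
    obtain ⟨s, hs, rfl⟩ := ht
    intro hnil
    rw [String.toList_eq_nil_iff.mp hnil] at hs
    exact hmem hs
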